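-- pv_equiv track=rewrite | github.com/pytorch/pytorch | torch/distributed/tensor/_random.py | _calc_shard_linear_idx
-- ===== SOURCE A (Python) =====
-- def _calc_shard_linear_idx(
--     shard_coord: list[int], shard_size: list[int]
-- ) -> int:
--     # compute shard linear index
--     shard_linear_idx = 0
--     shard_coord_stride = 1
--     for idx, size in zip(reversed(shard_coord), reversed(shard_size)):
--         shard_linear_idx += idx * shard_coord_stride
--         shard_coord_stride *= size
--
--     return shard_linear_idx
-- ===== SOURCE B (Python) =====
-- def _calc_shard_linear_idx(
--     shard_coord: list[int], shard_size: list[int]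
-- ) -> int:
--     # Horner's method over the tail-aligned (coord, size) pairs,
--     # most-significant digit first: acc = acc * size + coord.
--     pairs = list(zip(reversed(shard_coord), reversed(shard_size)))
--     acc = 0
--     for idx, size in reversed(pairs):
--         acc = acc * size + idx
--     return acc
-- ===== Notes on version B (the rewrite author's own statement) =====
-- stated objective: alternative
-- what changed: Replaces the running-stride accumulation (least-significant first, maintaining idx*stride sums) with Horner's method folding the tail-aligned pairs most-significant first with acc = acc*size + coord, eliminating the stride variable.
import Mathlib
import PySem

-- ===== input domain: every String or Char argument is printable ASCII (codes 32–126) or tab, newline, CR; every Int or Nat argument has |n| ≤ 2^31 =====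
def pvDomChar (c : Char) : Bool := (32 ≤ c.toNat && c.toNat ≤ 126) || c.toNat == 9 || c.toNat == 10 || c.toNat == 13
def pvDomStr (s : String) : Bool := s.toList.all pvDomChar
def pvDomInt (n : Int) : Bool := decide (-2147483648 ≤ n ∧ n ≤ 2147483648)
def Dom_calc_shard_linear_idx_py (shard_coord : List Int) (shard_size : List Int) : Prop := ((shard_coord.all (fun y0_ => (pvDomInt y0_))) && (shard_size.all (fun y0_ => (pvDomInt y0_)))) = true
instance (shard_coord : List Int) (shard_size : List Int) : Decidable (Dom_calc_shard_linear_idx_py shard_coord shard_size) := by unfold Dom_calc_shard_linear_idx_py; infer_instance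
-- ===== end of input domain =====

-- B replaces the stride-maintaining fold by Horner's method over the reversed pairs (alternative decomposition, same cost).


-- ===== PORT A =====
-- A: fold over zip(reversed coord, reversed size) keeping (linear_idx, stride) state.
def calc_shard_linear_idx_py (shard_coord : List Int) (shard_size : List Int) : Int :=
  ((List.zip shard_coord.reverse shard_size.reverse).foldl
    (fun (st : Int × Int) p => (st.1 + p.1 * st.2, st.2 * p.2)) (0, 1)).1

-- ===== PORT B =====
-- B: Horner's method, most-significant-first over the reversed tail-aligned pairs.
def calc_shard_linear_idx_py_alt (shard_coord : List Int) (shard_size : List Int) : Int :=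
  (List.zip shard_coord.reverse shard_size.reverse).reverse.foldl
    (fun acc p => acc * p.2 + p.1) 0

-- ===== PRECONDITION & SPEC =====
def Spec_calc_shard_linear_idx_py (shard_coord : List Int) (shard_size : List Int) (out : Int) : Prop := out = calc_shard_linear_idx_py_alt shard_coord shard_size
instance (shard_coord : List Int) (shard_size : List Int) (out : Int) : Decidable (Spec_calc_shard_linear_idx_py shard_coord shard_size out) := by unfold Spec_calc_shard_linear_idx_py; infer_instance

-- ===== CLAIM (what is proved, stated in full; the proofs are below) =====
def Claim_equal_calc_shard_linear_idx_py : Prop := ∀ (shard_coord : List Int) (shard_size : List Int), Dom_calc_shard_linear_idx_py shard_coord shard_size → Spec_calc_shard_linear_idx_py shard_coord shard_size (calc_shard_linear_idx_py shard_coord shard_size)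

-- ===== LEMMAS AND PROOFS =====
-- Invariant: A's fold from state (a, s) equals a + s * (Horner value of the list).
theorem stride_foldl_eq_horner (l : List (Int × Int)) (a s : Int) :
    (l.foldl (fun (st : Int × Int) p => (st.1 + p.1 * st.2, st.2 * p.2)) (a, s)).1
      = a + s * (l.reverse.foldl (fun acc p => acc * p.2 + p.1) 0) := by
  induction l generalizing a s with
  | nil => simp
  | cons p l ih =>
    simp only [List.foldl_cons, List.reverse_cons, List.foldl_append, List.foldl_cons,
      List.foldl_nil, ih]
    ring

-- ===== VERDICT (by name: the statement is the Claim_ definition above) =====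
theorem calc_shard_linear_idx_py_spec : Claim_equal_calc_shard_linear_idx_py := by
  intro shard_coord shard_size _
  unfold Spec_calc_shard_linear_idx_py calc_shard_linear_idx_py calc_shard_linear_idx_py_alt
  rw [stride_foldl_eq_horner]
  ring
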